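-- pv_equiv track=rewrite | github.com/EduartePaiva/leetcode | daily/ConvertArrayIntoA2d.py | findMatrix
-- ===== SOURCE A (Python) =====
-- def findMatrix(nums: list[int]) -> list[list[int]]:
--     res = []
--     nums.sort()
--
--     i=0
--     while i<len(nums):
--         num,j = nums[i], 0
--         while i < len(nums) and num == nums[i]:
--             if len(res) <= j:
--                 res.append([])
--             res[j].append(nums[i])
--             i+=1
--             j+=1
--     return res
-- ===== SOURCE B (Python) =====
-- def findMatrix(nums: list[int]) -> list[list[int]]:
--     # Different strategy: count frequencies in one pass, sort the distinct
--     # values only, and place each value v into rows 0..count(v)-1.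
--     # (Unlike the original, this does not sort nums in place; it agrees on
--     # the return value.)
--     cnt = {}
--     for x in nums:
--         cnt[x] = cnt.get(x, 0) + 1
--     rows = []
--     for v in sorted(cnt):
--         c = cnt[v]
--         rows += [[] for _ in range(c - len(rows))]
--         for j in range(c):
--             rows[j].append(v)
--     return rows
-- ===== Notes on version B (the rewrite author's own statement) =====
-- stated objective: alternative
-- what changed: Instead of sorting the whole list and scanning it with a nested index-based while loop, B builds a frequency dictionary in one pass, sorts only the distinct values, and appends each value v to rows 0..count(v)-1.
import Mathlib
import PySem

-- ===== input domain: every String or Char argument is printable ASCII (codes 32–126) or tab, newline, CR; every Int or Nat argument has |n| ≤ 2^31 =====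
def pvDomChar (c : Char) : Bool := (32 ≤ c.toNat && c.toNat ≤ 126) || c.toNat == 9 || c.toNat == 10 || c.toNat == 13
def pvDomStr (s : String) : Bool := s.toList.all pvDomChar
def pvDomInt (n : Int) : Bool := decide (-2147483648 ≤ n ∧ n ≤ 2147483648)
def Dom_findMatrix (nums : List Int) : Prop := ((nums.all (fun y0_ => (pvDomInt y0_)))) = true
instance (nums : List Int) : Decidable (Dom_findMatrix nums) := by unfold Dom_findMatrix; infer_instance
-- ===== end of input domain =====

-- B counts frequencies in one pass and sorts only the distinct values, instead of
-- sorting the whole list and scanning it with a nested index loop (A also sorts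
-- nums in place; B does not — the equivalence proved here is about the return value).

-- ===== PORT A =====
-- res[j].append(x), preceded by 'if len(res) <= j: res.append([])'
def placeA (res : List (List Int)) (j : Nat) (x : Int) : List (List Int) :=
  let res' := if res.length ≤ j then res ++ [([] : List Int)] else res
  res'.set j (res'.getD j [] ++ [x])

-- the inner 'while i < len(nums) and num == nums[i]' loop, walking the remaining suffix
def innerA (num : Int) : List Int → Nat → List (List Int) → List Int × List (List Int)
  | [], _, res => ([], res)
  | y :: t, j, res => if y = num then innerA num t (j + 1) (placeA res j y) else (y :: t, res)

lemma innerA_fst_length_le (num : Int) : ∀ (l : List Int) (j : Nat) (res : List (List Int)),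
    ((innerA num l j res).1).length ≤ l.length := by
  intro l
  induction l with
  | nil => intro j res; simp [innerA]
  | cons y t ih =>
    intro j res
    by_cases h : y = num
    · simp only [innerA, if_pos h]
      exact le_trans (ih _ _) (Nat.le_succ _)
    · simp [innerA, h]

-- the outer 'while i < len(nums)' loop
def loopA : List Int → List (List Int) → List (List Int)
  | [], res => res
  | x :: rest, res =>
    loopA (innerA x rest 1 (placeA res 0 x)).1 (innerA x rest 1 (placeA res 0 x)).2
  termination_by l _ => l.length
  decreasing_by
    exact Nat.lt_succ_of_le (innerA_fst_length_le _ _ _ _)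

def findMatrix (nums : List Int) : List (List Int) :=
  loopA (PySem.List.sorted nums (fun x => x)) []

-- ===== PORT B =====
def findMatrix_alt (nums : List Int) : List (List Int) :=
  let cnt := nums.foldl (fun d x => d.insert x (d.getD x 0 + 1)) (PySem.Dict.empty : PySem.Dict Int Int)
  (PySem.List.sorted cnt.keys (fun x => x)).foldl
    (fun rows v =>
      let c := cnt.getD v 0
      let rows := rows ++ (PySem.List.pyRange 0 (c - (rows.length : Int)) 1).map (fun _ => ([] : List Int))
      (PySem.List.pyRange 0 c 1).foldl
        (fun rows j => rows.set j.toNat (rows.getD j.toNat [] ++ [v])) rows)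
    []

-- ===== PRECONDITION & SPEC =====
def Spec_findMatrix (nums : List Int) (out : List (List Int)) : Prop := out = findMatrix_alt nums
instance (nums : List Int) (out : List (List Int)) : Decidable (Spec_findMatrix nums out) := by unfold Spec_findMatrix; infer_instance

-- ===== CLAIM (what is proved, stated in full; the proofs are below) =====
def Claim_equal_findMatrix : Prop := ∀ (nums : List Int), Dom_findMatrix nums → Spec_findMatrix nums (findMatrix nums)

-- ===== LEMMAS AND PROOFS =====

-- abstract run placement: put v into rows j, j+1, …, j+k-1
def runF (v : Int) : Nat → Nat → List (List Int) → List (List Int)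
  | _, 0, res => res
  | j, k + 1, res => runF v (j + 1) k (placeA res j v)

lemma getD_set_eq (l : List (List Int)) (j : Nat) (a : List Int) (h : j < l.length) :
    (l.set j a).getD j [] = a := by
  simp [List.getD_eq_getElem?_getD, h]

lemma getD_set_ne (l : List (List Int)) (i j : Nat) (a : List Int) (h : i ≠ j) :
    (l.set j a).getD i [] = l.getD i [] := by
  simp [List.getD_eq_getElem?_getD, Ne.symm h]

lemma getD_append_empty (res : List (List Int)) (i : Nat) :
    (res ++ [([] : List Int)]).getD i [] = res.getD i [] := by
  by_cases hi : i < res.length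
  · simp [List.getD_eq_getElem?_getD, List.getElem?_append_left hi]
  · by_cases hi2 : i = res.length
    · subst hi2
      rw [List.getD_eq_getElem?_getD, List.getD_eq_getElem?_getD,
        List.getElem?_append_right (le_refl _), List.getElem?_eq_none (le_refl _)]
      simp
    · have h1 : res.length + 1 ≤ i := by omega
      rw [List.getD_eq_getElem?_getD, List.getD_eq_getElem?_getD,
        List.getElem?_eq_none (by simpa using h1), List.getElem?_eq_none (by omega)]

lemma placeA_length (res : List (List Int)) (j : Nat) (v : Int) (h : j ≤ res.length) :
    (placeA res j v).length = max res.length (j + 1) := by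
  unfold placeA
  split_ifs with hle <;> simp <;> omega

lemma placeA_getD (res : List (List Int)) (j : Nat) (v : Int) (h : j ≤ res.length) (i : Nat) :
    (placeA res j v).getD i [] = if i = j then res.getD j [] ++ [v] else res.getD i [] := by
  unfold placeA
  by_cases hle : res.length ≤ j
  · have hj : j = res.length := le_antisymm h hle
    rw [if_pos hle]
    by_cases hij : i = j
    · subst hij
      rw [if_pos rfl, getD_set_eq _ _ _ (by simp; omega), getD_append_empty]
    · rw [if_neg hij, getD_set_ne _ _ _ _ hij, getD_append_empty]
  · have hj : j < res.length := by omega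
    rw [if_neg hle]
    by_cases hij : i = j
    · subst hij
      rw [if_pos rfl, getD_set_eq _ _ _ hj]
    · rw [if_neg hij, getD_set_ne _ _ _ _ hij]

lemma runF_length (v : Int) : ∀ (k j : Nat) (res : List (List Int)), j ≤ res.length →
    (runF v j k res).length = max res.length (j + k) := by
  intro k
  induction k with
  | zero => intro j res h; simp only [runF, Nat.add_zero]; omega
  | succ k ih =>
    intro j res h
    have h1 : j + 1 ≤ (placeA res j v).length := by rw [placeA_length _ _ _ h]; omega
    simp only [runF]
    rw [ih _ _ h1, placeA_length _ _ _ h]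
    omega

lemma runF_getD (v : Int) : ∀ (k j : Nat) (res : List (List Int)), j ≤ res.length → ∀ (i : Nat),
    (runF v j k res).getD i [] =
      if j ≤ i ∧ i < j + k then res.getD i [] ++ [v] else res.getD i [] := by
  intro k
  induction k with
  | zero =>
    intro j res h i
    rw [show runF v j 0 res = res from rfl, if_neg (by omega)]
  | succ k ih =>
    intro j res h i
    have h1 : j + 1 ≤ (placeA res j v).length := by rw [placeA_length _ _ _ h]; omega
    simp only [runF]
    rw [ih _ _ h1 i, placeA_getD _ _ _ h i]
    by_cases hij : i = j
    · subst hij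
      split_ifs <;> first | rfl | omega
    · simp only [hij, if_false]
      split_ifs <;> first | rfl | omega

-- the padding appended by B only contains empty rows, so getD with default [] is unchanged
lemma pad_getD (res pad : List (List Int)) (hpad : ∀ p ∈ pad, p = ([] : List Int)) (i : Nat) :
    (res ++ pad).getD i [] = res.getD i [] := by
  by_cases hi : i < res.length
  · simp [List.getD_eq_getElem?_getD, List.getElem?_append_left hi]
  · have h1 : res.length ≤ i := by omega
    rw [List.getD_eq_getElem?_getD, List.getD_eq_getElem?_getD,
      List.getElem?_append_right h1, List.getElem?_eq_none h1]
    cases h2 : (pad[i - res.length]?) with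
    | none => rfl
    | some p => simp [hpad p (List.mem_of_getElem? h2)]

-- B's inner loop: for j in range(c): rows[j].append(v)
lemma setsFold_spec (v : Int) (P : List (List Int)) : ∀ (m : Nat), m ≤ P.length →
    ((PySem.List.pyRange 0 (m : Int) 1).foldl
        (fun rows j => rows.set j.toNat (rows.getD j.toNat [] ++ [v])) P).length = P.length ∧
    ∀ i, ((PySem.List.pyRange 0 (m : Int) 1).foldl
        (fun rows j => rows.set j.toNat (rows.getD j.toNat [] ++ [v])) P).getD i [] =
      if i < m then P.getD i [] ++ [v] else P.getD i [] := by
  intro m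
  induction m with
  | zero =>
    intro _
    rw [show ((0 : Nat) : Int) = 0 from rfl, PySem.List.pyRange_one_eq_nil (le_refl 0)]
    exact ⟨rfl, fun i => by simp⟩
  | succ m ih =>
    intro hm
    have hm' : m ≤ P.length := by omega
    obtain ⟨ihlen, ihget⟩ := ih hm'
    have hcast : ((m + 1 : Nat) : Int) = (m : Int) + 1 := by push_cast; ring
    rw [hcast, PySem.List.pyRange_one_succ_right (by positivity), List.foldl_append]
    simp only [List.foldl_cons, List.foldl_nil, Int.toNat_natCast]
    refine ⟨by rw [List.length_set, ihlen], fun i => ?_⟩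
    by_cases him : i = m
    · subst him
      rw [getD_set_eq _ _ _ (by rw [ihlen]; omega), ihget i,
        if_neg (by omega), if_pos (by omega)]
    · rw [getD_set_ne _ _ _ _ him, ihget i]
      split_ifs <;> first | rfl | omega

-- B's per-value step (pad with empty rows, then append v to rows 0..c-1) equals runF
lemma stepB_eq_runF (v : Int) (c : Nat) (res : List (List Int)) :
    (PySem.List.pyRange 0 ((c : Int)) 1).foldl
      (fun rows j => rows.set j.toNat (rows.getD j.toNat [] ++ [v]))
      (res ++ (PySem.List.pyRange 0 ((c : Int) - (res.length : Int)) 1).map (fun _ => ([] : List Int)))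
    = runF v 0 c res := by
  set pad := (PySem.List.pyRange 0 ((c : Int) - (res.length : Int)) 1).map (fun _ => ([] : List Int)) with hpaddef
  have hpad : ∀ p ∈ pad, p = ([] : List Int) := by
    intro p hp
    rcases List.mem_map.mp hp with ⟨j, _, hj⟩
    exact hj.symm
  have hpadlen : (res ++ pad).length = max res.length c := by
    have hl : pad.length = ((c : Int) - (res.length : Int)).toNat := by
      rw [hpaddef, List.length_map, PySem.List.length_pyRange_one]
      congr 1
      omega
    simp only [List.length_append, hl]
    omega
  have hc : c ≤ (res ++ pad).length := by omega
  obtain ⟨hlen, hget⟩ := setsFold_spec v (res ++ pad) c hc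
  have hrlen : (runF v 0 c res).length = max res.length c := by
    rw [runF_length v c 0 res (by omega)]
    omega
  apply List.ext_getElem
  · rw [hlen, hpadlen, hrlen]
  · intro i h1 h2
    have e1 := hget i
    rw [List.getD_eq_getElem (hn := h1)] at e1
    have e2 := runF_getD v c 0 res (by omega) i
    rw [List.getD_eq_getElem (hn := h2)] at e2
    rw [e1, e2, pad_getD res pad hpad i]
    split_ifs <;> first | rfl | omega

-- innerA consumes exactly the leading run of num, placing it at rows j, j+1, …
lemma innerA_eq (v : Int) : ∀ (l : List Int) (j : Nat) (res : List (List Int)),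
    innerA v l j res =
      (l.dropWhile (fun y => decide (y = v)),
       runF v j ((l.takeWhile (fun y => decide (y = v))).length) res) := by
  intro l
  induction l with
  | nil => intro j res; simp [innerA, runF]
  | cons y t ih =>
    intro j res
    by_cases hy : y = v
    · subst hy
      simp only [innerA, List.dropWhile_cons, List.takeWhile_cons, decide_true, ih]
      rfl
    · simp [innerA, hy, runF]

-- after the leading run of x is dropped, every remaining element is strictly larger
lemma lt_of_mem_dropWhile : ∀ (rest : List Int) (x : Int), rest.Pairwise (· ≤ ·) →
    (∀ y ∈ rest, x ≤ y) → ∀ y ∈ rest.dropWhile (fun y => decide (y = x)), x < y := by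
  intro rest
  induction rest with
  | nil => simp
  | cons a l ih =>
    intro x hp hle y hy
    rw [List.dropWhile_cons] at hy
    by_cases ha : a = x
    · rw [if_pos (by simpa using ha)] at hy
      exact ih x ((List.pairwise_cons.mp hp).2) (fun z hz => hle z (List.mem_cons_of_mem a hz)) y hy
    · rw [if_neg (by simpa using ha)] at hy
      have hxa : x < a := lt_of_le_of_ne (hle a List.mem_cons_self) (fun e => ha e.symm)
      rcases List.mem_cons.mp hy with rfl | hy'
      · exact hxa
      · exact lt_of_lt_of_le hxa ((List.pairwise_cons.mp hp).1 y hy')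

-- decomposition of a sorted list into its first run and the (strictly larger) remainder
lemma run_decomp (x : Int) (rest : List Int) (h : (x :: rest).Pairwise (· ≤ ·)) :
    PySem.Set.ofList (x :: rest) =
        x :: PySem.Set.ofList (rest.dropWhile (fun y => decide (y = x))) ∧
    (rest.dropWhile (fun y => decide (y = x))).Pairwise (· ≤ ·) ∧
    (∀ y ∈ rest.dropWhile (fun y => decide (y = x)), x < y) ∧
    (x :: rest).count x = (rest.takeWhile (fun y => decide (y = x))).length + 1 ∧
    (∀ v ∈ rest.dropWhile (fun y => decide (y = x)), (x :: rest).count v =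
        (rest.dropWhile (fun y => decide (y = x))).count v) := by
  set tk := rest.takeWhile (fun y => decide (y = x)) with htk
  set t := rest.dropWhile (fun y => decide (y = x)) with ht
  have hrest : rest.Pairwise (· ≤ ·) := (List.pairwise_cons.mp h).2
  have hle : ∀ y ∈ rest, x ≤ y := (List.pairwise_cons.mp h).1
  have hsplit : tk ++ t = rest := List.takeWhile_append_dropWhile
  have htkx : ∀ y ∈ tk, y = x := by
    intro y hy
    simpa using List.mem_takeWhile_imp hy
  have htp : t.Pairwise (· ≤ ·) := hrest.sublist (List.dropWhile_sublist _)
  have htlt : ∀ y ∈ t, x < y := lt_of_mem_dropWhile rest x hrest hle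
  have hxnt : x ∉ t := fun hx => absurd (htlt x hx) (lt_irrefl x)
  have htkrep : tk = List.replicate tk.length x := List.eq_replicate_of_mem htkx
  refine ⟨?_, htp, htlt, ?_, ?_⟩
  · -- set decomposition
    have hs : x :: rest = List.replicate (tk.length + 1) x ++ t := by
      rw [List.replicate_succ, List.cons_append, ← htkrep, hsplit]
    rw [hs, PySem.Set.ofList_append]
    have hrep : ∀ (k : Nat), PySem.Set.ofList (List.replicate (k + 1) x) = [x] := by
      intro k
      induction k with
      | zero =>
        rw [List.replicate_succ, List.replicate_zero, PySem.Set.ofList_cons]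
        have hd : PySem.Set.discard (PySem.Set.ofList ([] : List Int)) x = [] := by
          apply List.eq_nil_iff_forall_not_mem.mpr
          intro y hy
          have hm := (PySem.Set.mem_discard _ _ _).mp hy
          simp [PySem.Set.ofList_nil] at hm
        rw [hd]
      | succ k ihk =>
        rw [List.replicate_succ (n := k + 1), PySem.Set.ofList_cons, ihk]
        have hd : PySem.Set.discard ([x] : PySem.Set Int) x = [] := by
          apply List.eq_nil_iff_forall_not_mem.mpr
          intro y hy
          have hm := (PySem.Set.mem_discard _ _ _).mp hy
          simp at hm
        rw [hd]
    rw [hrep, PySem.Set.update_eq_append_filter]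
    have hf : List.filter (fun y => !(PySem.Set.contains ([x] : PySem.Set Int) y)) (PySem.Set.ofList t)
        = PySem.Set.ofList t := by
      apply List.filter_eq_self.mpr
      intro y hy
      have hyt : y ∈ t := (PySem.Set.mem_ofList _ _).mp hy
      have hyx : y ≠ x := fun e => hxnt (e ▸ hyt)
      simp [PySem.Set.contains_eq_listContains, hyx]
    rw [hf]
    rfl
  · -- count of x
    have hs : x :: rest = x :: (tk ++ t) := by rw [hsplit]
    rw [hs]
    have h1 : tk.count x = tk.length := by
      conv_lhs => rw [htkrep]
      simp
    have h2 : t.count x = 0 := List.count_eq_zero.mpr hxnt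
    simp [List.count_append, h1, h2]
  · -- counts of values after the first run
    intro v hv
    have hvx : v ≠ x := fun e => absurd (htlt v hv) (by rw [e]; exact lt_irrefl x)
    have hs : x :: rest = x :: (tk ++ t) := by rw [hsplit]
    rw [hs]
    have h1 : tk.count v = 0 := by
      apply List.count_eq_zero.mpr
      intro hvm
      exact hvx (htkx v hvm)
    simp [List.count_append, h1, Ne.symm hvx]

-- the outer loop of A, over a sorted list, is a fold of runF over the distinct values
lemma loopA_eq : ∀ (n : Nat) (s : List Int), s.length ≤ n → s.Pairwise (· ≤ ·) →
    ∀ res, loopA s res =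
      (PySem.Set.ofList s).foldl (fun r v => runF v 0 (s.count v) r) res := by
  intro n
  induction n with
  | zero =>
    intro s hs _ res
    have hnil : s = [] := List.eq_nil_of_length_eq_zero (by omega)
    subst hnil
    simp [loopA, PySem.Set.ofList_nil]
  | succ n ih =>
    intro s hlen hp res
    cases s with
    | nil => simp [loopA, PySem.Set.ofList_nil]
    | cons x rest =>
      obtain ⟨hset, htp, htlt, hcx, hcv⟩ := run_decomp x rest hp
      set tk := rest.takeWhile (fun y => decide (y = x)) with htk
      set t := rest.dropWhile (fun y => decide (y = x)) with ht
      have htltlen : t.length ≤ n := by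
        have h1 : t.length ≤ rest.length := (List.dropWhile_sublist _).length_le
        simp at hlen
        omega
      rw [loopA, innerA_eq]
      have hrunstep : runF x 1 tk.length (placeA res 0 x) = runF x 0 (tk.length + 1) res := rfl
      simp only [← htk, ← ht, hrunstep]
      rw [ih t htltlen htp]
      rw [hset, List.foldl_cons, hcx]
      refine PySem.List.foldl_congr_mem (PySem.Set.ofList t)
        (fun r v => runF v 0 (t.count v) r)
        (fun r v => runF v 0 ((x :: rest).count v) r) _
        (fun acc v hv => ?_)
      have hv' : v ∈ t := (PySem.Set.mem_ofList _ _).mp hv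
      show runF v 0 (t.count v) acc = runF v 0 ((x :: rest).count v) acc
      rw [hcv v hv']

-- the distinct values of a sorted list, in order, are strictly increasing
lemma ofList_pairwise_lt : ∀ (n : Nat) (s : List Int), s.length ≤ n → s.Pairwise (· ≤ ·) →
    (PySem.Set.ofList s).Pairwise (· < ·) := by
  intro n
  induction n with
  | zero =>
    intro s hs _
    have hnil : s = [] := List.eq_nil_of_length_eq_zero (by omega)
    subst hnil
    simp [PySem.Set.ofList_nil]
  | succ n ih =>
    intro s hlen hp
    cases s with
    | nil => simp [PySem.Set.ofList_nil]
    | cons x rest =>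
      obtain ⟨hset, htp, htlt, -, -⟩ := run_decomp x rest hp
      set t := rest.dropWhile (fun y => decide (y = x)) with ht
      have htltlen : t.length ≤ n := by
        have h1 : t.length ≤ rest.length := (List.dropWhile_sublist _).length_le
        simp at hlen
        omega
      rw [hset]
      apply List.pairwise_cons.mpr
      exact ⟨fun y hy => htlt y ((PySem.Set.mem_ofList _ _).mp hy), ih t htltlen htp⟩

-- ===== VERDICT (by name: the statement is the Claim_ definition above) =====
theorem findMatrix_spec : Claim_equal_findMatrix := by
  intro nums _
  unfold Spec_findMatrix findMatrix findMatrix_alt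
  simp only [PySem.Dict.foldl_insert_getD_add_one_eq_counter, PySem.Dict.keys_counter]
  set s := PySem.List.sorted nums (fun x => x) with hs
  have hsp : s.Pairwise (· ≤ ·) := PySem.List.sorted_pairwise nums (fun x => x)
  have hks : PySem.List.sorted (PySem.Set.ofList nums) (fun x => x) = PySem.Set.ofList s := by
    apply PySem.List.sorted_eq_of_perm_of_pairwise_lt
    · apply (List.perm_ext_iff_of_nodup (PySem.Set.nodup_ofList _) (PySem.Set.nodup_ofList _)).mpr
      intro y
      rw [PySem.Set.mem_ofList, PySem.Set.mem_ofList, hs, PySem.List.mem_sorted]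
    · exact ofList_pairwise_lt s.length s (le_refl _) hsp
  rw [hks, loopA_eq s.length s (le_refl _) hsp []]
  apply PySem.List.foldl_congr_mem
  intro acc v hv
  have hcount : PySem.Dict.getD (PySem.Dict.counter nums) v 0 = ((s.count v : Nat) : Int) := by
    rw [PySem.Dict.getD_counter]
    congr 1
    exact (List.Perm.count_eq (PySem.List.sorted_perm nums (fun x => x) false) v).symm
  show runF v 0 (s.count v) acc
    = (PySem.List.pyRange 0 (PySem.Dict.getD (PySem.Dict.counter nums) v 0) 1).foldl
      (fun rows j => rows.set j.toNat (rows.getD j.toNat [] ++ [v]))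
      (acc ++ (PySem.List.pyRange 0 ((PySem.Dict.getD (PySem.Dict.counter nums) v 0) - (acc.length : Int)) 1).map
        (fun _ => ([] : List Int)))
  rw [hcount]
  exact (stepB_eq_runF v (s.count v) acc).symm
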